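-- pv_equiv track=rewrite | github.com/snucse-23-baekjoon/solutions | h-j-lim/15657.py | n_and_m
-- ===== SOURCE A (Python) =====
-- def n_and_m(n, m, possible_answers, length):
--     if length == m:
--         return possible_answers
--     else:
--         next_level = []
--         for x in possible_answers:
--             for num in range(x[-1], n + 1):
--                 next_level.append(x + [num])
--         return n_and_m(n, m, next_level, length + 1)
-- ===== SOURCE B (Python) =====
-- def n_and_m(n, m, possible_answers, length):
--     # DFS per seed: extend each seed independently to full depth (A grows all
--     # seeds level by level); same output order since A keeps seeds grouped.
--     def extend(prefix, k):
--         if k == 0: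
--             return [prefix]
--         out = []
--         for num in range(prefix[-1], n + 1):
--             out += extend(prefix + [num], k - 1)
--         return out
--     result = []
--     for x in possible_answers:
--         result += extend(x, m - length)
--     return result
-- ===== Notes on version B (the rewrite author's own statement) =====
-- stated objective: alternative
-- what changed: A grows the whole population breadth-first, rebuilding the entire list of partial sequences at every level; B extends each seed independently with a depth-first recursion over the remaining length, producing the same sequences in the same order.
import Mathlib
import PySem

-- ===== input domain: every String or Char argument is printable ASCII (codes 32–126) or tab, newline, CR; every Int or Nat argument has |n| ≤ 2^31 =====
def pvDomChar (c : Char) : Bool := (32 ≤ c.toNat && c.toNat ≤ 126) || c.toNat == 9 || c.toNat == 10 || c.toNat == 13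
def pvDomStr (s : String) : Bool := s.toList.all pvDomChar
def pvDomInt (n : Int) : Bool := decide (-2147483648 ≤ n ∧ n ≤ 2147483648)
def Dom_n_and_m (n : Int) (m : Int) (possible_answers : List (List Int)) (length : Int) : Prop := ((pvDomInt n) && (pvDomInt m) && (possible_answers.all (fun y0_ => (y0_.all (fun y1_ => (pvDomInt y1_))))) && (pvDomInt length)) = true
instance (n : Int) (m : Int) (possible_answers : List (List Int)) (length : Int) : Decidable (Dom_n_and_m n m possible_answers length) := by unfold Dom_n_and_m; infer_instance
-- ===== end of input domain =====

-- B replaces A's breadth-first level-by-level growth by a per-seed depth-first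
-- extension of the same sequences in the same order (objective: alternative).


-- ===== PORT A =====
def n_and_m (n : Int) (m : Int) (possible_answers : List (List Int)) (length : Int) : List (List Int) :=
  if length = m then possible_answers
  else
    let next_level := possible_answers.foldl (fun acc x =>
      (PySem.List.pyRange (PySem.List.pyGetD x (-1) 0) (n + 1) 1).foldl
        (fun acc2 num => acc2 ++ [x ++ [num]]) acc) []
    -- totality guard only: for m < length the Python recurses without bound (excluded by Pre_)
    if m ≤ length then next_level
    else n_and_m n m next_level (length + 1)
termination_by (m - length).toNat
decreasing_by omega

-- ===== PORT B =====
def pvExtend (n : Int) (pref : List Int) (k : Nat) : List (List Int) :=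
  match k with
  | 0 => [pref]
  | Nat.succ k' =>
    (PySem.List.pyRange (PySem.List.pyGetD pref (-1) 0) (n + 1) 1).foldl
      (fun out num => out ++ pvExtend n (pref ++ [num]) k') []

def n_and_m_alt (n : Int) (m : Int) (possible_answers : List (List Int)) (length : Int) : List (List Int) :=
  -- (m - length).toNat: under Pre_ length ≤ m, so this is exactly Python's m - length
  possible_answers.foldl (fun result x => result ++ pvExtend n x (m - length).toNat) []

-- ===== PRECONDITION & SPEC =====
-- Pre_ excludes exactly the inputs where Python A raises: length > m (unbounded
-- recursion, RecursionError) and length < m with an empty seed list (x[-1] IndexError).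
def Pre_n_and_m (n : Int) (m : Int) (possible_answers : List (List Int)) (length : Int) : Prop :=
  length ≤ m ∧ (length < m → ∀ x ∈ possible_answers, x ≠ [])
instance (n : Int) (m : Int) (possible_answers : List (List Int)) (length : Int) : Decidable (Pre_n_and_m n m possible_answers length) := by unfold Pre_n_and_m; infer_instance
def pvWitness_n_and_m : Int × Int × List (List Int) × Int := (3, 3, [[1], [2]], 1)
def Spec_n_and_m (n : Int) (m : Int) (possible_answers : List (List Int)) (length : Int) (out : List (List Int)) : Prop := out = n_and_m_alt n m possible_answers length
instance (n : Int) (m : Int) (possible_answers : List (List Int)) (length : Int) (out : List (List Int)) : Decidable (Spec_n_and_m n m possible_answers length out) := by unfold Spec_n_and_m; infer_instance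

-- ===== CLAIM (what is proved, stated in full; the proofs are below) =====
def Claim_equal_n_and_m : Prop := ∀ (n : Int) (m : Int) (possible_answers : List (List Int)) (length : Int), Dom_n_and_m n m possible_answers length → Pre_n_and_m n m possible_answers length → Spec_n_and_m n m possible_answers length (n_and_m n m possible_answers length)

-- ===== LEMMAS AND PROOFS =====

theorem pvFlattenSingleton {α β : Type} (f : α → β) (l : List α) :
    (l.map (fun x => [f x])).flatten = l.map f := by
  induction l <;> simp_all

-- A's one level of growth, as a flatMap
theorem pvStep_eq (n : Int) (pa : List (List Int)) :
    pa.foldl (fun acc x =>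
      (PySem.List.pyRange (PySem.List.pyGetD x (-1) 0) (n + 1) 1).foldl
        (fun acc2 num => acc2 ++ [x ++ [num]]) acc) []
    = pa.flatMap (fun x =>
        (PySem.List.pyRange (PySem.List.pyGetD x (-1) 0) (n + 1) 1).map (fun num => x ++ [num])) := by
  simp [PySem.List.foldl_append_singleton_eq_map, PySem.List.foldl_append_eq_flatMap, List.flatMap, pvFlattenSingleton]

-- B's one level of recursion, as a flatMap over the same children
theorem pvExtend_succ (n : Int) (x : List Int) (k : Nat) :
    pvExtend n x (k + 1)
    = ((PySem.List.pyRange (PySem.List.pyGetD x (-1) 0) (n + 1) 1).map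
        (fun num => x ++ [num])).flatMap (fun c => pvExtend n c k) := by
  simp [pvExtend, PySem.List.foldl_append_eq_flatMap, List.flatMap_map, List.flatMap, Function.comp_def]

theorem pvMain (k : Nat) : ∀ (n m length : Int) (pa : List (List Int)),
    (m - length).toNat = k → length ≤ m →
    n_and_m n m pa length = pa.flatMap (fun x => pvExtend n x k) := by
  induction k with
  | zero =>
    intro n m length pa hk hle
    have : length = m := by omega
    rw [n_and_m]
    simp [this, pvExtend]
  | succ k ih =>
    intro n m length pa hk hle
    have hlt : length < m := by omega
    rw [n_and_m]
    simp only [if_neg (by omega : ¬ length = m), if_neg (by omega : ¬ m ≤ length)]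
    rw [ih n m (length + 1) _ (by omega) (by omega), pvStep_eq, List.flatMap_assoc]
    simp only [pvExtend_succ]

-- ===== VERDICT (by name: the statement is the Claim_ definition above) =====
theorem n_and_m_spec : Claim_equal_n_and_m := by
  intro n m pa length _ hpre
  unfold Spec_n_and_m n_and_m_alt
  rw [pvMain (m - length).toNat n m length pa rfl hpre.1,
    PySem.List.foldl_append_eq_flatMap, List.nil_append]
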